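-- pv_equiv track=rewrite | github.com/skaicoding/codev | jupyter/codevclient/codevclient.py | join_lines_up_to_substring
-- ===== SOURCE A (Python) =====
-- def join_lines_up_to_substring(main_string, sub_string):
--     lines = main_string.split('\n')
--     result = []
--
--     for line in lines:
--         result.append(line)
--         if sub_string in line:
--             break
--
--     result = '\n'.join(result)
--     return result
-- ===== SOURCE B (Python) =====
-- def join_lines_up_to_substring(main_string, sub_string):
--     if '\n' in sub_string:
--         # a substring containing a newline can never occur inside a single line
--         return main_string
--     idx = main_string.find(sub_string)
--     if idx == -1:
--         return main_string
--     nl = main_string.find('\n', idx)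
--     if nl == -1:
--         return main_string
--     return main_string[:nl]
-- ===== Notes on version B (the rewrite author's own statement) =====
-- stated objective: idiomatic
-- what changed: Replaces A's split-into-lines plus per-line scan-and-break loop with two direct substring searches (first occurrence of sub_string, then the next newline) and one slice; substrings containing a newline are returned whole immediately since they can never occur inside a single line.
import Mathlib
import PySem

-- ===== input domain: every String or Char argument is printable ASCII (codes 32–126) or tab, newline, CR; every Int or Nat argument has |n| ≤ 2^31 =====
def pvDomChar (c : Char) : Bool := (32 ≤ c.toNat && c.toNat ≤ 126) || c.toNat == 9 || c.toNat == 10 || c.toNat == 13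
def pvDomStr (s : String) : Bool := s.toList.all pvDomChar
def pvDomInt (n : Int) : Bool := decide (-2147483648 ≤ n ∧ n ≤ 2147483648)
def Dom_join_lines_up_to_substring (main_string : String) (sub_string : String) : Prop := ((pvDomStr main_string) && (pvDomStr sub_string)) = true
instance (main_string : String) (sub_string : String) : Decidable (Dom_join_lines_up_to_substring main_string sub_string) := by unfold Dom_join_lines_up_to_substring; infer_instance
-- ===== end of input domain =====

-- B replaces A's split-into-lines-and-scan loop by two direct substring searches
-- (find the first occurrence, then the next newline) and one slice.

-- ===== PORT A =====
-- the 'for line in lines: result.append(line); if sub_string in line: break' loop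
def pvJoinLoop (sub : List Char) : List (List Char) → List (List Char)
  | [] => []
  | l :: ls => if PySem.Chars.isIn sub l then [l] else l :: pvJoinLoop sub ls

def join_lines_up_to_substring (main_string : String) (sub_string : String) : String :=
  String.ofList (PySem.Chars.join ['\n']
    (pvJoinLoop sub_string.toList (PySem.Chars.splitOn main_string.toList ['\n'])))

-- ===== PORT B =====
def join_lines_up_to_substring_alt (main_string : String) (sub_string : String) : String :=
  if PySem.Chars.isIn ['\n'] sub_string.toList then main_string
  else
    let idx := PySem.Chars.find main_string.toList sub_string.toList
    if idx = -1 then main_string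
    else
      let nl := PySem.Chars.findFrom main_string.toList ['\n'] idx
      if nl = -1 then main_string
      else String.ofList (PySem.Chars.slice main_string.toList none (some nl))

-- ===== PRECONDITION & SPEC =====
def Spec_join_lines_up_to_substring (main_string : String) (sub_string : String) (out : String) : Prop := out = join_lines_up_to_substring_alt main_string sub_string
instance (main_string : String) (sub_string : String) (out : String) : Decidable (Spec_join_lines_up_to_substring main_string sub_string out) := by unfold Spec_join_lines_up_to_substring; infer_instance

-- ===== CLAIM (what is proved, stated in full; the proofs are below) =====
def Claim_equal_join_lines_up_to_substring : Prop := ∀ (main_string : String) (sub_string : String), Dom_join_lines_up_to_substring main_string sub_string → Spec_join_lines_up_to_substring main_string sub_string (join_lines_up_to_substring main_string sub_string)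

-- ===== LEMMAS AND PROOFS =====

-- B's algorithm on char lists (take = the nonnegative slice main_string[:nl])
def pvB (s t : List Char) : List Char :=
  if PySem.Chars.isIn ['\n'] t then s
  else if PySem.Chars.find s t = -1 then s
  else if PySem.Chars.findFrom s ['\n'] (PySem.Chars.find s t) = -1 then s
  else s.take (PySem.Chars.findFrom s ['\n'] (PySem.Chars.find s t)).toNat


def pvSplit : List Char → List Char → List (List Char)
  | pre, [] => [pre]
  | pre, c :: rest => if c = '\n' then pre :: pvSplit [] rest else pvSplit (pre ++ [c]) rest

theorem pvSplit_go (l : List Char) : ∀ (fuel : Nat) (cur : List Char) (acc : List (List Char)),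
    l.length ≤ fuel →
    PySem.Chars.splitOn.go ['\n'] fuel l cur acc = acc.reverse ++ pvSplit cur.reverse l := by
  induction l with
  | nil =>
    intro fuel cur acc _
    cases fuel <;> simp [PySem.Chars.splitOn.go, pvSplit]
  | cons c rest ih =>
    intro fuel cur acc hf
    cases fuel with
    | zero => simp at hf
    | succ fuel =>
      rw [PySem.Chars.splitOn.go.eq_def]
      simp only [List.isPrefixOf, pvSplit]
      by_cases hc : c = '\n'
      · subst hc
        rw [if_pos (by simp [List.isPrefixOf])]
        rw [show List.drop ['\n'].length ('\n' :: rest) = rest from rfl]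
        rw [ih fuel [] (cur.reverse :: acc) (by simpa using Nat.le_of_succ_le_succ hf)]
        simp
      · rw [if_neg (by simp [List.isPrefixOf]; exact fun h => hc h.symm), if_neg hc]
        rw [ih fuel (c :: cur) acc (by simpa using Nat.le_of_succ_le_succ hf)]
        simp

theorem pvSplitOn_eq (s : List Char) : PySem.Chars.splitOn s ['\n'] = pvSplit [] s := by
  rw [PySem.Chars.splitOn, pvSplit_go s (s.length + 1) [] [] (by omega)]
  simp

theorem pvSplit_ne_nil (pre s : List Char) : pvSplit pre s ≠ [] := by
  induction s generalizing pre with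
  | nil => simp [pvSplit]
  | cons c rest ih =>
    by_cases hc : c = '\n' <;> simp [pvSplit, hc, ih]

theorem pvSplit_join (pre s : List Char) :
    PySem.Chars.join ['\n'] (pvSplit pre s) = pre ++ s := by
  induction s generalizing pre with
  | nil => simp [pvSplit, PySem.Chars.join_singleton]
  | cons c rest ih =>
    by_cases hc : c = '\n'
    · subst hc
      rw [pvSplit, if_pos rfl]
      obtain ⟨q, qs, hq⟩ : ∃ q qs, pvSplit ([] : List Char) rest = q :: qs := by
        cases h : pvSplit ([] : List Char) rest with
        | nil => exact absurd h (pvSplit_ne_nil _ _)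
        | cons q qs => exact ⟨q, qs, rfl⟩
      rw [hq, PySem.Chars.join_cons_cons, ← hq, ih]
      simp
    · rw [pvSplit]; rw [if_neg hc, ih]; simp

theorem pvSplit_no_nl (pre s : List Char) (hpre : '\n' ∉ pre) :
    ∀ l ∈ pvSplit pre s, '\n' ∉ l := by
  induction s generalizing pre with
  | nil => simpa [pvSplit] using hpre
  | cons c rest ih =>
    by_cases hc : c = '\n'
    · subst hc
      rw [pvSplit, if_pos rfl]
      rintro l hl
      rcases List.mem_cons.mp hl with rfl | hl'
      · exact hpre
      · exact ih [] (by simp) l hl'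
    · rw [pvSplit, if_neg hc]
      exact ih (pre ++ [c]) (by simp [hpre, Ne.symm hc]) 

theorem pvSplit_infix (pre s : List Char) : ∀ l ∈ pvSplit pre s, l <:+: pre ++ s := by
  induction s generalizing pre with
  | nil => simp [pvSplit]
  | cons c rest ih =>
    by_cases hc : c = '\n'
    · subst hc
      rw [pvSplit, if_pos rfl]
      rintro l hl
      rcases List.mem_cons.mp hl with rfl | hl'
      · exact (List.prefix_append _ _).isInfix
      · exact (ih [] l (by simpa using hl')).trans ((List.suffix_cons '\n' rest).trans (List.suffix_append _ _)).isInfix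
    · rw [pvSplit, if_neg hc]
      intro l hl
      have := ih (pre ++ [c]) l hl
      simpa using this

theorem pvSplit_decomp (u : List Char) (hu : '\n' ∉ u) (pre v : List Char) :
    pvSplit pre (u ++ '\n' :: v) = (pre ++ u) :: pvSplit [] v := by
  induction u generalizing pre with
  | nil => simp [pvSplit]
  | cons c u' ih =>
    have hc : c ≠ '\n' := fun h => hu (h ▸ List.mem_cons_self)
    rw [List.cons_append, pvSplit, if_neg hc, ih (fun h => hu (List.mem_cons_of_mem _ h))]
    simp

theorem pvSplit_of_no_nl (s : List Char) (hs : '\n' ∉ s) : ∀ (pre : List Char),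
    pvSplit pre s = [pre ++ s] := by
  induction s with
  | nil => simp [pvSplit]
  | cons c rest ih =>
    intro pre
    have hc : c ≠ '\n' := fun h => hs (h ▸ List.mem_cons_self)
    rw [pvSplit, if_neg hc, ih (fun h => hs (List.mem_cons_of_mem _ h))]
    simp



theorem pvJoinLoop_id (t : List Char) (ls : List (List Char))
    (h : ∀ l ∈ ls, PySem.Chars.isIn t l = false) : pvJoinLoop t ls = ls := by
  induction ls with
  | nil => rfl
  | cons l ls ih =>
    rw [pvJoinLoop, if_neg (by simp [h l List.mem_cons_self]), ih (fun x hx => h x (List.mem_cons_of_mem _ hx))]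

theorem pvJoinLoop_ne_nil (t : List Char) (ls : List (List Char)) (h : ls ≠ []) :
    pvJoinLoop t ls ≠ [] := by
  cases ls with
  | nil => exact absurd rfl h
  | cons l ls => rw [pvJoinLoop]; split <;> simp

theorem pvPrefix_no_nl (t : List Char) (ht : '\n' ∉ t) :
    ∀ (u v : List Char), t <+: u ++ '\n' :: v → t <+: u := by
  induction t with
  | nil => intro u v _; exact List.nil_prefix
  | cons a t' ih =>
    intro u v h
    cases u with
    | nil =>
      obtain ⟨r, hr⟩ := h
      simp at hr
      exact absurd (hr.1 ▸ List.mem_cons_self) ht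
    | cons b u' =>
      obtain ⟨r, hr⟩ := h
      simp at hr
      obtain ⟨rfl, hr2⟩ := hr
      have : t' <+: u' ++ '\n' :: v := ⟨r, hr2⟩
      exact (List.prefix_cons_inj a).mpr (ih (fun hm => ht (List.mem_cons_of_mem _ hm)) u' v this)

theorem pvDrop_past (u v : List Char) (i : Nat) (hi : u.length + 1 ≤ i) :
    (u ++ '\n' :: v).drop i = v.drop (i - u.length - 1) := by
  have h1 : i = u.length + (1 + (i - u.length - 1)) := by omega
  rw [h1, List.drop_length_add_append, Nat.add_comm 1, List.drop_succ_cons]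
  congr 1
  omega

theorem pvInfix_split (t u v : List Char) (ht : '\n' ∉ t) (h : t <:+: u ++ '\n' :: v) :
    t <:+: u ∨ t <:+: v := by
  have hisin : PySem.Chars.isIn t (u ++ '\n' :: v) = true := (PySem.Chars.isIn_iff_infix _ _).mpr h
  obtain ⟨i, hi⟩ := (PySem.Chars.exists_prefix_drop_iff_isIn _ _).mpr hisin
  by_cases hiu : i ≤ u.length
  · rw [List.drop_append_of_le_length hiu] at hi
    left
    exact ((pvPrefix_no_nl t ht _ _ hi).isInfix).trans (List.drop_suffix i u).isInfix
  · right
    push_neg at hiu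
    rw [pvDrop_past u v i (by omega)] at hi
    exact (hi.isInfix).trans (List.drop_suffix _ v).isInfix

theorem pvFind_eq (s t : List Char) (j : Nat) (h1 : t <+: s.drop j)
    (h2 : ∀ i < j, ¬ t <+: s.drop i) : PySem.Chars.find s t = (j : Int) := by
  have hin : t <:+: s := (h1.isInfix).trans (List.drop_suffix j s).isInfix
  have hnn : 0 ≤ PySem.Chars.find s t := (PySem.Chars.find_nonneg_iff _ _).mpr hin
  obtain ⟨hp, hmin⟩ := PySem.Chars.find_spec hnn
  have hje : (PySem.Chars.find s t).toNat = j := by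
    rcases Nat.lt_trichotomy (PySem.Chars.find s t).toNat j with h | h | h
    · exact absurd hp (h2 _ h)
    · exact h
    · exact absurd h1 (hmin j h)
  omega

theorem pvFind_nl (u v : List Char) (hu : '\n' ∉ u) :
    PySem.Chars.find (u ++ '\n' :: v) ['\n'] = (u.length : Int) := by
  apply pvFind_eq
  · rw [List.drop_append_of_le_length (le_refl _), List.drop_length]
    simp
  · intro i hi hpre
    rw [List.drop_append_of_le_length (by omega)] at hpre
    obtain ⟨r, hr⟩ := hpre
    have hne : u.drop i ≠ [] := by simp; omega
    cases hd : u.drop i with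
    | nil => exact hne hd
    | cons d rest' =>
      rw [hd] at hr
      simp at hr
      exact hu (hr.1 ▸ (List.drop_subset i u (hd ▸ List.mem_cons_self)))

theorem pvFind_nl_none (s : List Char) (hs : '\n' ∉ s) :
    PySem.Chars.find s ['\n'] = -1 := by
  rw [PySem.Chars.find_eq_neg_one_iff]
  rw [List.singleton_infix_iff]
  exact hs

theorem pvFind_shift (u v t : List Char) (ht : '\n' ∉ t) (hu : ¬ t <:+: u) (hv : t <:+: v) :
    PySem.Chars.find (u ++ '\n' :: v) t = ((u.length + 1 : Nat) : Int) + PySem.Chars.find v t := by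
  have hnn : 0 ≤ PySem.Chars.find v t := (PySem.Chars.find_nonneg_iff _ _).mpr hv
  obtain ⟨hp, hmin⟩ := PySem.Chars.find_spec hnn
  set k := (PySem.Chars.find v t).toNat with hk
  have : PySem.Chars.find (u ++ '\n' :: v) t = ((u.length + 1 + k : Nat) : Int) := by
    apply pvFind_eq
    · rw [pvDrop_past u v _ (by omega), show u.length + 1 + k - u.length - 1 = k from by omega]
      exact hp
    · intro i hi hpre
      by_cases hiu : i ≤ u.length
      · rw [List.drop_append_of_le_length hiu] at hpre
        exact hu ((pvPrefix_no_nl t ht _ _ hpre).isInfix.trans (List.drop_suffix i u).isInfix)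
      · push_neg at hiu
        rw [pvDrop_past u v i (by omega)] at hpre
        exact hmin _ (by omega) hpre
  omega

theorem pvDecomp (s : List Char) (hs : '\n' ∈ s) :
    ∃ u v, s = u ++ '\n' :: v ∧ '\n' ∉ u := by
  induction s with
  | nil => simp at hs
  | cons c rest ih =>
    by_cases hc : c = '\n'
    · exact ⟨[], rest, by simp [hc], by simp⟩
    · obtain ⟨u, v, rfl, hu⟩ := ih ((List.mem_cons.mp hs).resolve_left (fun h => hc h.symm))
      exact ⟨c :: u, v, rfl, by simp [hu]; exact fun h => hc h.symm⟩

theorem pvB_no_match (s t : List Char) (h1 : PySem.Chars.isIn ['\n'] t = false)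
    (h2 : PySem.Chars.find s t = -1) : pvB s t = s := by
  rw [pvB, if_neg (by simp [h1]), if_pos h2]

theorem pvMain_pos : ∀ (n : Nat) (s t : List Char), s.length ≤ n → '\n' ∉ t → t <:+: s →
    PySem.Chars.join ['\n'] (pvJoinLoop t (pvSplit [] s)) = pvB s t := by
  intro n
  induction n with
  | zero =>
    intro s t hlen ht hinf
    have hs : s = [] := List.eq_nil_of_length_eq_zero (by omega)
    subst hs
    have htn : t = [] := List.eq_nil_of_infix_nil hinf
    subst htn
    decide
  | succ n ih =>
    intro s t hlen ht hinf
    have hnlt : PySem.Chars.isIn ['\n'] t = false :=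
      (PySem.Chars.isIn_eq_false_iff _ _).mpr (by rw [List.singleton_infix_iff]; exact ht)
    have hnn : 0 ≤ PySem.Chars.find s t := (PySem.Chars.find_nonneg_iff _ _).mpr hinf
    have hle : PySem.Chars.find s t ≤ (s.length : Int) := PySem.Chars.find_le_length _ _
    by_cases hs : '\n' ∈ s
    · obtain ⟨u, v, rfl, hu⟩ := pvDecomp s hs
      rw [pvSplit_decomp u hu [] v, List.nil_append]
      by_cases htu : t <:+: u
      · -- the match is inside the first line
        rw [pvJoinLoop, if_pos ((PySem.Chars.isIn_iff_infix _ _).mpr htu),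
          PySem.Chars.join_singleton]
        -- B: the first occurrence lies inside u and the next newline is at u.length
        obtain ⟨j, hj, hjr⟩ : ∃ j, t <+: u.drop j ∧ j + t.length ≤ u.length := by
          obtain ⟨j, hj⟩ := (PySem.Chars.exists_prefix_drop_iff_isIn _ _).mpr
            ((PySem.Chars.isIn_iff_infix _ _).mpr htu)
          by_cases hju : u.length < j
          · have : t = [] := by
              have := List.drop_of_length_le (l := u) (i := j) (by omega)
              rw [this] at hj
              exact List.prefix_nil.mp hj
            exact ⟨0, by simp [this], by simp [this]⟩
          · refine ⟨j, hj, ?_⟩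
            have := hj.length_le
            simp at this
            omega
        have hpres : t <+: (u ++ '\n' :: v).drop j := by
          rw [List.drop_append_of_le_length (by omega)]
          exact List.prefix_append_of_prefix hj
        set k := (PySem.Chars.find (u ++ '\n' :: v) t).toNat with hkdef
        obtain ⟨hsp, hsmin⟩ := PySem.Chars.find_spec hnn
        have hkj : k ≤ j := by
          by_contra hc
          exact hsmin j (by omega) hpres
        have hku : k ≤ u.length := by omega
        have hfindk : PySem.Chars.find (u ++ '\n' :: v) t = ((k : Nat) : Int) := by omega
        have hlen_drop : ((u.drop k).length : Int) = (u.length : Int) - k := by simp; omega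
        have hBs : pvB (u ++ '\n' :: v) t = u := by
          rw [pvB, if_neg (by simp [hnlt]), if_neg (by omega), hfindk,
            PySem.Chars.findFrom_natCast _ _ k (by simp; omega),
            List.drop_append_of_le_length hku,
            pvFind_nl (u.drop k) v (fun hm => hu (List.drop_subset k u hm)), hlen_drop,
            if_neg (show ¬((u.length : Int) - (k : Int) = -1) from by omega),
            if_neg (by omega),
            show ((k : Int) + ((u.length : Int) - (k : Int))).toNat = u.length from by omega,
            List.take_left]
        exact hBs.symm
      · -- no match in the first line: peel it and recurse
        rw [pvJoinLoop, if_neg (by simp [(PySem.Chars.isIn_eq_false_iff _ _).mpr htu])]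
        have htv : t <:+: v := (pvInfix_split t u v ht hinf).resolve_left htu
        obtain ⟨q, qs, hq⟩ : ∃ q qs, pvJoinLoop t (pvSplit [] v) = q :: qs := by
          cases h : pvJoinLoop t (pvSplit [] v) with
          | nil => exact absurd h (pvJoinLoop_ne_nil t _ (pvSplit_ne_nil [] v))
          | cons q qs => exact ⟨q, qs, rfl⟩
        rw [hq, PySem.Chars.join_cons_cons, ← hq,
          ih v t (by simp at hlen; omega) ht htv]
        -- now compute both pvB's
        have hv0 : 0 ≤ PySem.Chars.find v t := (PySem.Chars.find_nonneg_iff _ _).mpr htv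
        set k' := (PySem.Chars.find v t).toNat with hk'
        have hfv : PySem.Chars.find v t = ((k' : Nat) : Int) := by omega
        have hk'v : k' ≤ v.length := by
          have := PySem.Chars.find_le_length v t
          omega
        have hshift : PySem.Chars.find (u ++ '\n' :: v) t = ((u.length + 1 + k' : Nat) : Int) := by
          rw [pvFind_shift u v t ht htu htv, hfv]
          push_cast
          ring
        have hdrop : (u ++ '\n' :: v).drop (u.length + 1 + k') = v.drop k' :=  by
          rw [pvDrop_past u v _ (by omega)]
          congr 1
          omega
        by_cases hnl2 : PySem.Chars.find (v.drop k') ['\n'] = -1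
        · have hBv : pvB v t = v := by
            rw [pvB, if_neg (by simp [hnlt]), hfv, if_neg (by omega),
              PySem.Chars.findFrom_natCast _ _ k' hk'v, if_pos hnl2, if_pos rfl]
          have hBs : pvB (u ++ '\n' :: v) t = u ++ '\n' :: v := by
            rw [pvB, if_neg (by simp [hnlt]), hshift, if_neg (by omega),
              PySem.Chars.findFrom_natCast _ _ (u.length + 1 + k') (by simp; omega), hdrop,
              if_pos hnl2, if_pos rfl]
          rw [hBv, hBs]
          simp
        · have hnl2' : 0 ≤ PySem.Chars.find (v.drop k') ['\n'] := by
            have := PySem.Chars.neg_one_le_find (v.drop k') ['\n']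
            omega
          set f2 := (PySem.Chars.find (v.drop k') ['\n']).toNat with hf2
          have hBv : pvB v t = v.take (k' + f2) := by
            rw [pvB, if_neg (by simp [hnlt]), hfv, if_neg (by omega),
              PySem.Chars.findFrom_natCast _ _ k' hk'v, if_neg hnl2, if_neg (by omega),
              show (((k' : Nat) : Int) + PySem.Chars.find (v.drop k') ['\n']).toNat = k' + f2
                from by omega]
          have hBs : pvB (u ++ '\n' :: v) t = (u ++ '\n' :: v).take (u.length + (1 + (k' + f2))) := by
            rw [pvB, if_neg (by simp [hnlt]), hshift, if_neg (by omega),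
              PySem.Chars.findFrom_natCast _ _ (u.length + 1 + k') (by simp; omega), hdrop,
              if_neg hnl2, if_neg (by omega),
              show (((u.length + 1 + k' : Nat) : Int) + PySem.Chars.find (v.drop k') ['\n']).toNat
                  = u.length + (1 + (k' + f2)) from by omega]
          rw [hBv, hBs, List.take_length_add_append, Nat.add_comm 1, List.take_succ_cons]
          simp
    · -- no newline in s at all: single line, match found, B finds no newline after it
      rw [pvSplit_of_no_nl s hs [], List.nil_append, pvJoinLoop,
        if_pos ((PySem.Chars.isIn_iff_infix _ _).mpr hinf), PySem.Chars.join_singleton]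
      set k := (PySem.Chars.find s t).toNat with hkdef
      have hfk : PySem.Chars.find s t = ((k : Nat) : Int) := by omega
      rw [pvB, if_neg (by simp [hnlt]), if_neg (by omega), hfk,
        PySem.Chars.findFrom_natCast _ _ k (by omega),
        pvFind_nl_none _ (fun hm => hs (List.drop_subset k s hm)), if_pos rfl, if_pos rfl]

theorem pvMain (s t : List Char) :
    PySem.Chars.join ['\n'] (pvJoinLoop t (pvSplit [] s)) = pvB s t := by
  by_cases h1 : PySem.Chars.isIn ['\n'] t = true
  · have hmem : '\n' ∈ t := by
      have := (PySem.Chars.isIn_iff_infix _ _).mp h1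
      exact (List.singleton_infix_iff _ _).mp this
    rw [pvJoinLoop_id t _ (fun l hl => (PySem.Chars.isIn_eq_false_iff _ _).mpr
        (fun hinf => pvSplit_no_nl [] s (by simp) l hl (hinf.subset hmem))),
      pvSplit_join, List.nil_append, pvB, if_pos h1]
  · have hb : PySem.Chars.isIn ['\n'] t = false := by simpa using h1
    have ht : '\n' ∉ t := by
      intro hm
      exact h1 ((PySem.Chars.isIn_iff_infix _ _).mpr ((List.singleton_infix_iff _ _).mpr hm))
    by_cases h2 : t <:+: s
    · exact pvMain_pos s.length s t (le_refl _) ht h2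
    · rw [pvJoinLoop_id t _ (fun l hl => (PySem.Chars.isIn_eq_false_iff _ _).mpr
          (fun hinf => h2 (hinf.trans (by simpa using pvSplit_infix [] s l hl)))),
        pvSplit_join, List.nil_append,
        pvB_no_match s t hb ((PySem.Chars.find_eq_neg_one_iff _ _).mpr h2)]

theorem pvAlt_eq (m sb : String) :
    join_lines_up_to_substring_alt m sb = String.ofList (pvB m.toList sb.toList) := by
  simp only [join_lines_up_to_substring_alt, pvB]
  split_ifs with h1 h2 h3
  · rw [String.ofList_toList]
  · rw [String.ofList_toList]
  · rw [String.ofList_toList]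
  · -- nl ≥ 0 in this branch, so the slice is a take
    have hnn : 0 ≤ PySem.Chars.find m.toList sb.toList := by
      have := PySem.Chars.neg_one_le_find m.toList sb.toList
      omega
    have hle := PySem.Chars.find_le_length m.toList sb.toList
    set k := (PySem.Chars.find m.toList sb.toList).toNat with hk
    have hfk : PySem.Chars.find m.toList sb.toList = ((k : Nat) : Int) := by omega
    rw [hfk] at h3 ⊢
    rw [PySem.Chars.findFrom_natCast _ _ k (by omega)] at h3 ⊢
    by_cases hin : PySem.Chars.find (m.toList.drop k) ['\n'] = -1
    · rw [if_pos hin] at h3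
      exact absurd rfl h3
    · have h0 : 0 ≤ PySem.Chars.find (m.toList.drop k) ['\n'] := by
        have := PySem.Chars.neg_one_le_find (m.toList.drop k) ['\n']
        omega
      rw [if_neg hin] at h3 ⊢
      congr 1
      have : ((k : Nat) : Int) + PySem.Chars.find (m.toList.drop k) ['\n']
          = (((((k : Nat) : Int) + PySem.Chars.find (m.toList.drop k) ['\n']).toNat : Nat) : Int) := by
        omega
      rw [this]
      simp [pysem]

-- ===== VERDICT (by name: the statement is the Claim_ definition above) =====
theorem join_lines_up_to_substring_spec : Claim_equal_join_lines_up_to_substring := by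
  intro m sb _
  unfold Spec_join_lines_up_to_substring join_lines_up_to_substring
  rw [pvSplitOn_eq, pvMain, pvAlt_eq]
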